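-- pv_equiv track=rewrite | github.com/ansjcy/query-insights | predict_query_performance.py | calculate_query_depth
-- ===== SOURCE A (Python) =====
-- def calculate_query_depth(query_string):
--     """
--     Calculate the depth of a query by counting nested levels.
--
--     Args:
--         query_string: The query as a string
--
--     Returns:
--         Depth of the query
--     """
--     if not query_string:
--         return 0
--
--     max_depth = 0
--     current_depth = 0
--
--     for c in query_string:
--         if c == '{' or c == '[':
--             current_depth += 1
--             max_depth = max(max_depth, current_depth)
--         elif c == '}' or c == ']':
--             current_depth -= 1
--
--     return max_depth
-- ===== SOURCE B (Python) =====
-- def _profile(s):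
--     """Return (max running depth over all prefixes incl. empty, net depth change) of s."""
--     if len(s) <= 1:
--         d = 1 if s in ('{', '[') else -1 if s in ('}', ']') else 0
--         return (max(0, d), d)
--     mid = len(s) // 2
--     ml, sl = _profile(s[:mid])
--     mr, sr = _profile(s[mid:])
--     return (max(ml, sl + mr), sl + sr)
--
-- def calculate_query_depth(query_string):
--     return _profile(query_string)[0]
-- ===== Notes on version B (the rewrite author's own statement) =====
-- stated objective: alternative
-- what changed: Replaces the single left-to-right running-max loop with a divide-and-conquer recursion: each half yields a (max prefix depth, net depth change) pair and halves combine by (max(ml, sl+mr), sl+sr).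
import Mathlib
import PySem

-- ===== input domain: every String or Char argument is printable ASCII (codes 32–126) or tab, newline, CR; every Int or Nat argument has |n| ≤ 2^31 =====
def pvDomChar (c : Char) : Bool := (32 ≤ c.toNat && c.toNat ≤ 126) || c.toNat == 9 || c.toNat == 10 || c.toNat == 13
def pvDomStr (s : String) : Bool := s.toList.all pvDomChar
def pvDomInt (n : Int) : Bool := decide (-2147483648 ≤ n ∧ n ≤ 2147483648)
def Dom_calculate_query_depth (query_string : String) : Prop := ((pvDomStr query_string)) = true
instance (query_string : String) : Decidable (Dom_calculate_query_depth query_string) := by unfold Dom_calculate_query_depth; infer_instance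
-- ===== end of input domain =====

-- B computes the depth by divide-and-conquer over string halves (combining (max-prefix-depth, net-change) pairs) instead of A's single running-max loop; same cost, proved equal.

-- ===== PORT A =====
-- A: early return on empty string, then one loop carrying (max_depth, current_depth).
def calculate_query_depth (query_string : String) : Int :=
  if query_string = "" then 0
  else
    (query_string.toList.foldl
      (fun (st : Int × Int) c =>
        if c = '{' ∨ c = '[' then (max st.1 (st.2 + 1), st.2 + 1)
        else if c = '}' ∨ c = ']' then (st.1, st.2 - 1)
        else st)
      (0, 0)).1

-- ===== PORT B =====
-- B: _profile returns (max running depth over all prefixes incl. the empty one, net depth change);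
-- strings of length ≤ 1 are the base case, longer strings split at len//2 and combine.
def pvDelta (c : Char) : Int :=
  if c = '{' ∨ c = '[' then 1 else if c = '}' ∨ c = ']' then -1 else 0

def pvProfile : List Char → Int × Int
  | [] => (0, 0)
  | [c] => (max 0 (pvDelta c), pvDelta c)
  | c1 :: c2 :: rest =>
    let l := c1 :: c2 :: rest
    let mid := l.length / 2
    let pa := pvProfile (l.take mid)
    let pb := pvProfile (l.drop mid)
    (max pa.1 (pa.2 + pb.1), pa.2 + pb.2)
termination_by l => l.length
decreasing_by
  · simp; omega
  · simp; omega

def calculate_query_depth_alt (query_string : String) : Int :=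
  (pvProfile query_string.toList).1

-- ===== PRECONDITION & SPEC =====
def Spec_calculate_query_depth (query_string : String) (out : Int) : Prop := out = calculate_query_depth_alt query_string
instance (query_string : String) (out : Int) : Decidable (Spec_calculate_query_depth query_string out) := by unfold Spec_calculate_query_depth; infer_instance

-- ===== CLAIM (what is proved, stated in full; the proofs are below) =====
def Claim_equal_calculate_query_depth : Prop := ∀ (query_string : String), Dom_calculate_query_depth query_string → Spec_calculate_query_depth query_string (calculate_query_depth query_string)

-- ===== LEMMAS AND PROOFS =====

-- Reference semantics: max prefix depth (empty prefix included) and net sum, defined structurally.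
def pvMx : List Char → Int
  | [] => 0
  | c :: t => max 0 (pvDelta c + pvMx t)

def pvS (l : List Char) : Int := (l.map pvDelta).sum

theorem pvMx_nonneg (l : List Char) : 0 ≤ pvMx l := by
  cases l with
  | nil => simp [pvMx]
  | cons c t => simp [pvMx]

theorem pvMx_append (a b : List Char) : pvMx (a ++ b) = max (pvMx a) (pvS a + pvMx b) := by
  induction a with
  | nil =>
    have := pvMx_nonneg b
    simp [pvMx, pvS]; omega
  | cons c t ih =>
    have := pvMx_nonneg b
    simp only [List.cons_append, pvMx, ih, pvS, List.map_cons, List.sum_cons]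
    omega

theorem pvS_append (a b : List Char) : pvS (a ++ b) = pvS a + pvS b := by
  simp [pvS]

theorem pvProfile_eq (l : List Char) : pvProfile l = (pvMx l, pvS l) := by
  induction l using pvProfile.induct with
  | case1 => rw [pvProfile]; simp [pvMx, pvS]
  | case2 c => rw [pvProfile]; simp [pvMx, pvS]
  | case3 c1 c2 rest l mid ih1 ih2 =>
    rw [pvProfile]
    rw [ih1, ih2]
    have h : (c1 :: c2 :: rest).take ((c1 :: c2 :: rest).length / 2)
        ++ (c1 :: c2 :: rest).drop ((c1 :: c2 :: rest).length / 2) = c1 :: c2 :: rest :=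
      List.take_append_drop _ _
    conv_rhs => rw [← h]
    rw [pvMx_append, pvS_append]

-- A's loop from state (m, d) with d ≤ m computes (max m (d + max prefix depth), d + net sum).
theorem pv_loop_inv (l : List Char) : ∀ (m d : Int), d ≤ m →
    List.foldl
      (fun (st : Int × Int) c =>
        if c = '{' ∨ c = '[' then (max st.1 (st.2 + 1), st.2 + 1)
        else if c = '}' ∨ c = ']' then (st.1, st.2 - 1)
        else st)
      (m, d) l
    = (max m (d + pvMx l), d + pvS l) := by
  induction l with
  | nil => intro m d h; simp [pvMx, pvS]; omega
  | cons c t ih =>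
    intro m d h
    have hnn := pvMx_nonneg t
    simp only [List.foldl_cons, pvMx]
    by_cases h1 : c = '{' ∨ c = '['
    · rw [if_pos h1, ih (max m (d + 1)) (d + 1) (le_max_right _ _)]
      simp only [pvDelta, if_pos h1, pvS, List.map_cons, List.sum_cons]
      simp only [Prod.mk.injEq]
      constructor <;> omega
    · by_cases h2 : c = '}' ∨ c = ']'
      · rw [if_neg h1, if_pos h2, ih m (d - 1) (by omega)]
        simp only [pvDelta, if_neg h1, if_pos h2, pvS, List.map_cons, List.sum_cons]
        simp only [Prod.mk.injEq]
        constructor <;> omega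
      · rw [if_neg h1, if_neg h2, ih m d h]
        simp only [pvDelta, if_neg h1, if_neg h2, pvS, List.map_cons, List.sum_cons]
        simp only [Prod.mk.injEq]
        constructor <;> omega

-- ===== VERDICT (by name: the statement is the Claim_ definition above) =====
theorem calculate_query_depth_spec : Claim_equal_calculate_query_depth := by
  intro s _
  unfold Spec_calculate_query_depth calculate_query_depth calculate_query_depth_alt
  rw [pvProfile_eq]
  by_cases hs : s = ""
  · subst hs; simp [pvMx]
  · rw [if_neg hs, pv_loop_inv s.toList 0 0 le_rfl]
    have := pvMx_nonneg s.toList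
    simp; omega
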